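-- pv_equiv track=rewrite | github.com/HeIIow2/BwInf-40 | round1/wortsuche/wortsuche.py | letter_is_valid
-- ===== SOURCE A (Python) =====
-- def get_word_count(word_list: list, grid: list):
--     word_counter = 0
--     for word in word_list:
--         if word in grid[0] or word in grid[1]:
--             word_counter += 1
--
--     return word_counter
--
-- def letter_is_valid(word_list: list, letter: str, row_int: int, column_int: int, grid):
--     current_row = ''
--     current_col = ''
--     after_row = ''
--     after_col = ''
--
--     for r in range(len(grid)):
--         row = grid[r]
--
--         for c in range(len(row)):
--             column = row[c]
--             if row_int == r and row[c] is not None: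
--                 current_row += row[c]
--                 after_row += row[c]
--
--             if column_int == c and row[c] is not None:
--                 current_col += row[c]
--                 after_col += row[c]
--
--             if row_int == r and column_int == c:
--                 after_row += letter
--                 after_col += letter
--
--     prev_word_count = get_word_count(word_list, (current_row, current_col))
--     after_word_count = get_word_count(word_list, (after_row, after_col))
--
--     if after_word_count != prev_word_count:
--         return False
--     else:
--         return True
-- ===== SOURCE B (Python) =====
-- def letter_is_valid(word_list: list, letter: str, row_int: int, column_int: int, grid):
--     # Scan only the target row and the target column instead of the whole grid.
--     cur_row_parts = []
--     aft_row_parts = []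
--     if 0 <= row_int < len(grid):
--         for c, cell in enumerate(grid[row_int]):
--             if cell is not None:
--                 cur_row_parts.append(cell)
--                 aft_row_parts.append(cell)
--             if c == column_int:
--                 aft_row_parts.append(letter)
--
--     cur_col_parts = []
--     aft_col_parts = []
--     for r, row in enumerate(grid):
--         if 0 <= column_int < len(row):
--             cell = row[column_int]
--             if cell is not None:
--                 cur_col_parts.append(cell)
--                 aft_col_parts.append(cell)
--             if r == row_int:
--                 aft_col_parts.append(letter)
--
--     cur_row = ''.join(cur_row_parts)
--     aft_row = ''.join(aft_row_parts)
--     cur_col = ''.join(cur_col_parts)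
--     aft_col = ''.join(aft_col_parts)
--
--     prev = sum(1 for w in word_list if w in cur_row or w in cur_col)
--     after = sum(1 for w in word_list if w in aft_row or w in aft_col)
--     return after == prev
-- ===== Notes on version B (the rewrite author's own statement) =====
-- stated objective: alternative
-- what changed: Instead of scanning every cell of the grid and filtering by index equality, B reads only the target row (one pass over grid[row_int] when in range) and the target column (one lookup per row), then compares the two word counts directly.
import Mathlib
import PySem

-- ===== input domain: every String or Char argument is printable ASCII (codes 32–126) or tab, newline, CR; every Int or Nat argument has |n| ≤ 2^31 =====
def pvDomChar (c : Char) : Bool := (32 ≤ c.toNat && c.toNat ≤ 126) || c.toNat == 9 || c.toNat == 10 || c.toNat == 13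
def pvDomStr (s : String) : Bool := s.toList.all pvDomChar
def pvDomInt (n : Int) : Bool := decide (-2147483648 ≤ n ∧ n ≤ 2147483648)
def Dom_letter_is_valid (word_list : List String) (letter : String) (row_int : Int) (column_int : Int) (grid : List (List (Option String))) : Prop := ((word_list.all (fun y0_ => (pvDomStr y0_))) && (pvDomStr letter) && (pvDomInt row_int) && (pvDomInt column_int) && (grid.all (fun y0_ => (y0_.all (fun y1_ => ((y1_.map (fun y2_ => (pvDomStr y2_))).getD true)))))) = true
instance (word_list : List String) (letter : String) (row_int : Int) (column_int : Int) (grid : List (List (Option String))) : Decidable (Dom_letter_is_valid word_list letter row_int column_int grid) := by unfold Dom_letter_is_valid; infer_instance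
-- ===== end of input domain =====

-- B scans only the target row and the target column instead of scanning the whole grid and filtering by index (intended as faster; a timing run measured only ~1.3x, so no speed is claimed).


-- ===== PORT A =====
-- Python strings are accumulated as List Char ('+=' on str is '++' on the char lists; exact).
-- A's per-cell body updates the (current_row, after_row) strings and the (current_col, after_col)
-- strings independently, so the state is bundled as a pair of pairs and the body split in two helpers.
def pvAStepRow (letter : String) (row_int column_int : Int) (row : List (Option String)) (r : Nat)
    (p : List Char × List Char) (c : Nat) : List Char × List Char :=
  let cell := row.getD c none
  let p := if row_int == (r : Int) then
             (match cell with
              | some s => (p.1 ++ s.toList, p.2 ++ s.toList)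
              | none => p)
           else p
  if row_int == (r : Int) && column_int == (c : Int) then (p.1, p.2 ++ letter.toList) else p

def pvAStepCol (letter : String) (row_int column_int : Int) (row : List (Option String)) (r : Nat)
    (q : List Char × List Char) (c : Nat) : List Char × List Char :=
  let cell := row.getD c none
  let q := if column_int == (c : Int) then
             (match cell with
              | some s => (q.1 ++ s.toList, q.2 ++ s.toList)
              | none => q)
           else q
  if row_int == (r : Int) && column_int == (c : Int) then (q.1, q.2 ++ letter.toList) else q

-- get_word_count(word_list, (g0, g1)): counter loop, 'word in g0 or word in g1'
def pvGetWordCount (word_list : List String) (g0 g1 : List Char) : Int :=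
  word_list.foldl (fun cnt word =>
    if PySem.Chars.isIn word.toList g0 || PySem.Chars.isIn word.toList g1 then cnt + 1 else cnt) 0

def letter_is_valid (word_list : List String) (letter : String) (row_int : Int) (column_int : Int) (grid : List (List (Option String))) : Bool :=
  -- st = ((current_row, after_row), (current_col, after_col))
  let st := (List.range grid.length).foldl
    (fun (st : (List Char × List Char) × (List Char × List Char)) r =>
      let row := grid.getD r []   -- grid[r], r in range
      (List.range row.length).foldl
        (fun st c => (pvAStepRow letter row_int column_int row r st.1 c,
                      pvAStepCol letter row_int column_int row r st.2 c)) st)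
    (([], []), ([], []))
  let prev_word_count := pvGetWordCount word_list st.1.1 st.2.1
  let after_word_count := pvGetWordCount word_list st.1.2 st.2.2
  if after_word_count != prev_word_count then false else true

-- ===== PORT B =====
-- (cur_row, aft_row) from the single target row
def pvRowStrings (letter : String) (column_int : Int) (row : List (Option String)) : List Char × List Char :=
  (PySem.List.enumerate row 0).foldl
    (fun p ec =>
      let p := match ec.2 with
        | some s => (p.1 ++ s.toList, p.2 ++ s.toList)
        | none => p
      if ec.1 == column_int then (p.1, p.2 ++ letter.toList) else p)
    ([], [])

-- (cur_col, aft_col): one lookup per row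
def pvColStrings (letter : String) (row_int column_int : Int) (grid : List (List (Option String))) : List Char × List Char :=
  (PySem.List.enumerate grid 0).foldl
    (fun q er =>
      if 0 ≤ column_int ∧ column_int < (er.2.length : Int) then
        let q := match er.2.getD column_int.toNat none with
          | some s => (q.1 ++ s.toList, q.2 ++ s.toList)
          | none => q
        if er.1 == row_int then (q.1, q.2 ++ letter.toList) else q
      else q)
    ([], [])

def letter_is_valid_alt (word_list : List String) (letter : String) (row_int : Int) (column_int : Int) (grid : List (List (Option String))) : Bool :=
  let rowp := if 0 ≤ row_int ∧ row_int < (grid.length : Int)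
              then pvRowStrings letter column_int (grid.getD row_int.toNat [])
              else ([], [])
  let colp := pvColStrings letter row_int column_int grid
  let prev := word_list.countP (fun w => PySem.Chars.isIn w.toList rowp.1 || PySem.Chars.isIn w.toList colp.1)
  let after := word_list.countP (fun w => PySem.Chars.isIn w.toList rowp.2 || PySem.Chars.isIn w.toList colp.2)
  after == prev

-- ===== PRECONDITION & SPEC =====
def Spec_letter_is_valid (word_list : List String) (letter : String) (row_int : Int) (column_int : Int) (grid : List (List (Option String))) (out : Bool) : Prop := out = letter_is_valid_alt word_list letter row_int column_int grid
instance (word_list : List String) (letter : String) (row_int : Int) (column_int : Int) (grid : List (List (Option String))) (out : Bool) : Decidable (Spec_letter_is_valid word_list letter row_int column_int grid out) := by unfold Spec_letter_is_valid; infer_instance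

-- ===== CLAIM (what is proved, stated in full; the proofs are below) =====
def Claim_equal_letter_is_valid : Prop := ∀ (word_list : List String) (letter : String) (row_int : Int) (column_int : Int) (grid : List (List (Option String))), Dom_letter_is_valid word_list letter row_int column_int grid → Spec_letter_is_valid word_list letter row_int column_int grid (letter_is_valid word_list letter row_int column_int grid)

-- ===== LEMMAS AND PROOFS =====

-- replace the folded function by a pointwise-equal one
theorem pv_foldl_congr {α β : Type} (l : List α) (f g : β → α → β) (init : β)
    (h : ∀ s a, f s a = g s a) : l.foldl f init = l.foldl g init := by
  induction l generalizing init with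
  | nil => rfl
  | cons x xs ih => simp only [List.foldl_cons, h]; exact ih _

-- a fold over enumerate(xs, k) is a fold over range(len(xs)) reading xs[i]
theorem pv_foldl_enumerate_range {α β : Type} (xs : List α) (d : α) (f : β → Int × α → β) :
    ∀ (k : Int) (init : β),
    (PySem.List.enumerate xs k).foldl f init
      = (List.range xs.length).foldl (fun s (i : Nat) => f s (k + (i : Int), xs.getD i d)) init := by
  induction xs with
  | nil => intro k init; simp [PySem.List.enumerate]
  | cons x xs ih =>
    intro k init
    rw [PySem.List.enumerate_cons]
    simp only [List.foldl_cons, List.length_cons, List.range_succ_eq_map, List.foldl_map]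
    rw [ih (k + 1)]
    have h0 : f init (k + ((0 : Nat) : Int), (x :: xs).getD 0 d) = f init (k, x) := by
      norm_num
    rw [← h0]
    exact pv_foldl_congr _ _ _ _ (fun s i => by
      have h1 : k + 1 + (i : Int) = k + ((i + 1 : Nat) : Int) := by push_cast; ring
      simp [h1])

-- a fold whose step fires only at index t hits at most once over range(n)
theorem pv_foldl_range_hit {β : Type} (t : Int) (u : β → Nat → β) :
    ∀ (n : Nat) (init : β),
    (List.range n).foldl (fun s (i : Nat) => if t == (i : Int) then u s i else s) init
      = if 0 ≤ t ∧ t < (n : Int) then u init t.toNat else init := by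
  intro n
  induction n with
  | zero =>
    intro init
    simp
  | succ n ih =>
    intro init
    rw [List.range_succ, List.foldl_append]
    simp only [List.foldl_cons, List.foldl_nil, ih]
    by_cases ht : t = (n : Int)
    · have h1 : ¬ (0 ≤ t ∧ t < (n : Int)) := by omega
      have h2 : (0 ≤ t ∧ t < ((n + 1 : Nat) : Int)) := by push_cast; omega
      have h3 : t.toNat = n := by omega
      simp [ht]
    · have h2 : (0 ≤ t ∧ t < ((n + 1 : Nat) : Int)) ↔ (0 ≤ t ∧ t < (n : Int)) := by
        push_cast; omega
      have h4 : (t == (n : Int)) = false := by simpa using ht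
      by_cases hc : 0 ≤ t ∧ t < (n : Int)
      · have hc' : 0 ≤ t ∧ t < ((n + 1 : Nat) : Int) := h2.mpr hc
        simp only [h4, Bool.false_eq_true, if_false, hc, if_true, hc', and_true]
      · have hc' : ¬ (0 ≤ t ∧ t < ((n + 1 : Nat) : Int)) := fun h => hc (h2.mp h)
        simp only [h4, Bool.false_eq_true, if_false, hc, hc']

-- A's whole double loop, row half: equals B's pvRowStrings on the target row (or ([],[]) out of range)
theorem pvA_row_eq (letter : String) (row_int column_int : Int) (grid : List (List (Option String))) :
    (List.range grid.length).foldl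
      (fun p r => (List.range (grid.getD r []).length).foldl
        (pvAStepRow letter row_int column_int (grid.getD r []) r) p) (([], []) : List Char × List Char)
    = (if 0 ≤ row_int ∧ row_int < (grid.length : Int)
       then pvRowStrings letter column_int (grid.getD row_int.toNat [])
       else ([], [])) := by
  -- canonical inner fold once the row index matches
  have hstep : ∀ (row : List (Option String)) (r : Nat),
      (row_int == (r : Int)) = true →
      ∀ (p : List Char × List Char) (c : Nat),
      pvAStepRow letter row_int column_int row r p c
        = (fun (p : List Char × List Char) (c : Nat) =>
            let p := match row.getD c none with
              | some s => (p.1 ++ s.toList, p.2 ++ s.toList)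
              | none => p
            if column_int == (c : Int) then (p.1, p.2 ++ letter.toList) else p) p c := by
    intro row r h p c
    cases hcell : row.getD c none <;> simp [pvAStepRow, h]
  have h1 : ∀ (p : List Char × List Char) (r : Nat),
      (List.range (grid.getD r []).length).foldl
        (pvAStepRow letter row_int column_int (grid.getD r []) r) p
      = if row_int == (r : Int) then
          (List.range (grid.getD r []).length).foldl
            (fun (p : List Char × List Char) (c : Nat) =>
              let p := match (grid.getD r []).getD c none with
                | some s => (p.1 ++ s.toList, p.2 ++ s.toList)
                | none => p
              if column_int == (c : Int) then (p.1, p.2 ++ letter.toList) else p) p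
        else p := by
    intro p r
    cases h : row_int == (r : Int)
    · simp only [Bool.false_eq_true, if_false]
      rw [pv_foldl_congr _ _ (fun (s : List Char × List Char) (_ : Nat) => s) _
            (fun s c => by cases hcell : (grid.getD r []).getD c none <;> simp [pvAStepRow, h])]
      exact List.foldl_fixed _
    · simp only [if_true]
      exact pv_foldl_congr _ _ _ _ (hstep _ r h)
  rw [pv_foldl_congr _ _ _ _ h1, pv_foldl_range_hit row_int _ grid.length]
  by_cases hr : 0 ≤ row_int ∧ row_int < (grid.length : Int)
  · simp only [hr]
    unfold pvRowStrings
    rw [pv_foldl_enumerate_range _ none _ 0]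
    exact pv_foldl_congr _ _ _ _ (fun p c => by
      cases (grid.getD row_int.toNat []).getD c none <;>
        simp [Bool.beq_comm])
  · simp [hr]

-- A's whole double loop, column half: equals B's pvColStrings
theorem pvA_col_eq (letter : String) (row_int column_int : Int) (grid : List (List (Option String))) :
    (List.range grid.length).foldl
      (fun q r => (List.range (grid.getD r []).length).foldl
        (pvAStepCol letter row_int column_int (grid.getD r []) r) q) (([], []) : List Char × List Char)
    = pvColStrings letter row_int column_int grid := by
  -- per row: the inner loop hits at most the single column column_int
  have h1 : ∀ (q : List Char × List Char) (r : Nat),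
      (List.range (grid.getD r []).length).foldl
        (pvAStepCol letter row_int column_int (grid.getD r []) r) q
      = if 0 ≤ column_int ∧ column_int < ((grid.getD r []).length : Int) then
          (fun (q : List Char × List Char) (c : Nat) =>
            let q := match (grid.getD r []).getD c none with
              | some s => (q.1 ++ s.toList, q.2 ++ s.toList)
              | none => q
            if row_int == (r : Int) then (q.1, q.2 ++ letter.toList) else q) q column_int.toNat
        else q := by
    intro q r
    rw [pv_foldl_congr _ _
          (fun (q : List Char × List Char) (c : Nat) =>
            if column_int == (c : Int) then
              (fun (q : List Char × List Char) (c : Nat) =>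
                let q := match (grid.getD r []).getD c none with
                  | some s => (q.1 ++ s.toList, q.2 ++ s.toList)
                  | none => q
                if row_int == (r : Int) then (q.1, q.2 ++ letter.toList) else q) q c
            else q) _
          (fun q c => by
            cases h : column_int == (c : Int) <;>
              cases hcell : (grid.getD r []).getD c none <;>
                simp [pvAStepCol, h])]
    exact pv_foldl_range_hit column_int _ (grid.getD r []).length q
  rw [pv_foldl_congr _ _ _ _ h1]
  unfold pvColStrings
  rw [pv_foldl_enumerate_range _ [] _ 0]
  exact pv_foldl_congr _ _ _ _ (fun q r => by
    by_cases hrr : row_int = (r : Int)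
    · simp [hrr]
    · have hrr' : ¬ ((r : Int) = row_int) := fun e => hrr e.symm
      simp [hrr, hrr'])

-- ===== VERDICT (by name: the statement is the Claim_ definition above) =====
theorem letter_is_valid_spec : Claim_equal_letter_is_valid := by
  intro word_list letter row_int column_int grid _
  unfold Spec_letter_is_valid
  have hsplit :
      (List.range grid.length).foldl
        (fun (st : (List Char × List Char) × (List Char × List Char)) r =>
          let row := grid.getD r []
          (List.range row.length).foldl
            (fun st c => (pvAStepRow letter row_int column_int row r st.1 c,
                          pvAStepCol letter row_int column_int row r st.2 c)) st)
        (([], []), ([], []))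
      = ((if 0 ≤ row_int ∧ row_int < (grid.length : Int)
          then pvRowStrings letter column_int (grid.getD row_int.toNat [])
          else ([], [])),
         pvColStrings letter row_int column_int grid) := by
    rw [pv_foldl_congr _ _
          (fun (st : (List Char × List Char) × (List Char × List Char)) (r : Nat) =>
            ((List.range (grid.getD r []).length).foldl
               (pvAStepRow letter row_int column_int (grid.getD r []) r) st.1,
             (List.range (grid.getD r []).length).foldl
               (pvAStepCol letter row_int column_int (grid.getD r []) r) st.2)) _
          (fun st r => by
            obtain ⟨p, q⟩ := st
            exact PySem.List.foldl_prod_mk _ _ _ _ _)]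
    rw [← pvA_row_eq letter row_int column_int grid, ← pvA_col_eq letter row_int column_int grid]
    exact PySem.List.foldl_prod_mk
      (fun p r => List.foldl (pvAStepRow letter row_int column_int (grid.getD r []) r) p
        (List.range (grid.getD r []).length))
      (fun q r => List.foldl (pvAStepCol letter row_int column_int (grid.getD r []) r) q
        (List.range (grid.getD r []).length))
      _ _ _
  simp only [letter_is_valid, letter_is_valid_alt, pvGetWordCount, hsplit]
  rw [PySem.List.foldl_count_if, PySem.List.foldl_count_if]
  simp only [zero_add, bne]
  cases hcmp : ((word_list.countP fun w =>
        PySem.Chars.isIn w.toList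
            (if 0 ≤ row_int ∧ row_int < (grid.length : Int)
             then pvRowStrings letter column_int (grid.getD row_int.toNat [])
             else ([], [])).2 ||
          PySem.Chars.isIn w.toList (pvColStrings letter row_int column_int grid).2 : Nat)
      == (word_list.countP fun w =>
        PySem.Chars.isIn w.toList
            (if 0 ≤ row_int ∧ row_int < (grid.length : Int)
             then pvRowStrings letter column_int (grid.getD row_int.toNat [])
             else ([], [])).1 ||
          PySem.Chars.isIn w.toList (pvColStrings letter row_int column_int grid).1)) <;>
    simp_all [beq_iff_eq]
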